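-- pv_equiv track=rewrite | github.com/CodecoolGlobal/keymaker-python-pappbence15 | keymaker.py | pad_up_to
-- ===== SOURCE A (Python) =====
-- import string
-- import math
--
-- def shift_characters(word, shift):
--     alphabet = string.ascii_lowercase
--     char_indexes = [alphabet.index(char) for char in word]
--     shifted_indexes = [(number + shift) % 26 for number in char_indexes]
--     new_word = ''
--     for number in shifted_indexes:
--         new_word += alphabet[number]
--     return new_word
--
-- def pad_up_to(word, shift, n):
--     new_shift = shift
--     times = math.ceil(n / len(word))
--     pad_string = word
--     for i in range(times):
--         pad_string += shift_characters(word, new_shift)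
--         new_shift += shift
--     return pad_string[:n]
-- ===== SOURCE B (Python) =====
-- import string
--
--
-- def pad_up_to(word, shift, n):
--     alphabet = string.ascii_lowercase
--     length = len(word)
--     return ''.join(alphabet[(alphabet.index(word[p % length]) + (p // length) * shift) % 26]
--                    for p in range(n))
-- ===== Notes on version B (the rewrite author's own statement) =====
-- stated objective: alternative
-- what changed: A builds ceil(n/len) whole shifted copies of the word by repeated string concatenation with an accumulated shift and then truncates with [:n]; B never builds blocks: it emits exactly the n output characters one by one, computing the character at position p directly by the closed form alphabet[(index(word[p%len]) + (p//len)*shift) % 26] in a single join, so the helper, the accumulator and the final truncation all disappear.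
-- intended difference: For negative n with |n| < len(word) A returns word[:n], a leftover of the unconditional word prefix it truncates, while B returns '', the intended result of padding up to a non-positive length (A itself returns '' once |n| >= len(word)). — e.g. on pad_up_to("ab", 1, -1): A returns "a", B returns ""
import Mathlib
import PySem

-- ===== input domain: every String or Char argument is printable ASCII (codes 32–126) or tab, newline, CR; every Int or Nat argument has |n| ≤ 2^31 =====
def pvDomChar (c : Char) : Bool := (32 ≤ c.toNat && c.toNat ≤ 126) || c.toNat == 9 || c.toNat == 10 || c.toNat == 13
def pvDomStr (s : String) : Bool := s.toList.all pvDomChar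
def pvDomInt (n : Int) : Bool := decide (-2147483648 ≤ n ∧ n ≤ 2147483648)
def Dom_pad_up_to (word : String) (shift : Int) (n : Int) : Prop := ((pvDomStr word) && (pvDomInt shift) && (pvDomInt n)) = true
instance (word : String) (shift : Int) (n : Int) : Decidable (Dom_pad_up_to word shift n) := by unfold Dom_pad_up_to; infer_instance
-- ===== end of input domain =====

-- B emits the n output characters position-by-position via the closed form
-- alphabet[(index(word[p%len]) + (p//len)*shift) % 26] instead of A's block building +
-- truncation (objective: alternative); for -len(word) < n < 0 A returns word[:n], B returns ''.


-- ===== PORT A =====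
-- string.ascii_lowercase (shared constant of both programs)
def pvAlph : List Char := "abcdefghijklmnopqrstuvwxyz".toList

-- alphabet.index(char): raises ValueError for a char outside a-z — those inputs are excluded
-- by Pre_; alphabet[number] is always in range (0 ≤ number % 26 < 26), so the getD default is unused.
def shift_characters (word : String) (shift : Int) : String :=
  let char_indexes := word.toList.map (fun c => PySem.Chars.find pvAlph [c])
  let shifted_indexes := char_indexes.map (fun number => PySem.Int.mod (number + shift) 26)
  String.ofList (shifted_indexes.foldl
    (fun new_word number => new_word ++ [(PySem.List.pyGet? pvAlph number).getD 'a']) [])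

-- math.ceil(n / len(word)) ported as the exact ceiling -((-n) // len(word)) (the float
-- division is exact at Dom's magnitudes); ZeroDivisionError on the empty word is excluded by Pre_.
def pad_up_to (word : String) (shift : Int) (n : Int) : String :=
  let new_shift := shift
  let times := -(PySem.Int.floordiv (-n) (PySem.Str.len word))
  let st := (PySem.List.pyRange 0 times 1).foldl
    (fun (st : String × Int) _ => (st.1 ++ shift_characters word st.2, st.2 + shift))
    (word, new_shift)
  PySem.Str.slice st.1 none (some n)

-- ===== PORT B =====
-- alphabet.index(word[p % length]): ValueError outside a-z is excluded by Pre_ (only reached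
-- when n > 0); word[p % length] and alphabet[... % 26] are always in range, the getD defaults are unused.
def pad_up_to_alt (word : String) (shift : Int) (n : Int) : String :=
  let length := PySem.Str.len word
  String.ofList ((PySem.List.pyRange 0 n 1).map (fun p =>
    (PySem.List.pyGet? pvAlph (PySem.Int.mod
      (PySem.Chars.find pvAlph [(PySem.Str.pyGet? word (PySem.Int.mod p length)).getD ' ']
        + PySem.Int.floordiv p length * shift) 26)).getD 'a'))

-- ===== PRECONDITION & SPEC =====
-- Pre_ is exactly where the Python A returns: it excludes the empty word (ZeroDivisionError in
-- math.ceil) and, when n > 0 (so the first shifted block is computed), words with a character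
-- outside a-z (ValueError from alphabet.index).
def Pre_pad_up_to (word : String) (shift : Int) (n : Int) : Prop :=
  word.toList ≠ [] ∧
    (n ≤ 0 ∨ (word.toList.all fun c => 97 ≤ c.toNat && c.toNat ≤ 122) = true)
instance (word : String) (shift : Int) (n : Int) : Decidable (Pre_pad_up_to word shift n) := by
  unfold Pre_pad_up_to; infer_instance
def pvWitness_pad_up_to : String × Int × Int := ("ab", 3, 7)

-- For negative n with |n| < len(word) A returns word[:n], a leftover of the unconditional word
-- prefix it truncates, while B returns '', the intended result of padding up to a non-positive
-- length (A itself returns '' once |n| >= len(word)).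
def D_pad_up_to (word : String) (shift : Int) (n : Int) : Prop :=
  n < 0 ∧ 0 < (word.toList.length : Int) + n
instance (word : String) (shift : Int) (n : Int) : Decidable (D_pad_up_to word shift n) := by
  unfold D_pad_up_to; infer_instance

def Spec_pad_up_to (word : String) (shift : Int) (n : Int) (out : String) : Prop :=
  ¬ D_pad_up_to word shift n → out = pad_up_to_alt word shift n
instance (word : String) (shift : Int) (n : Int) (out : String) : Decidable (Spec_pad_up_to word shift n out) := by unfold Spec_pad_up_to; infer_instance

def pvDiffWitness_pad_up_to : String × Int × Int := ("ab", 1, -1)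
def pvDiffWitnessOut_pad_up_to : String × String := ("a", "")

-- ===== CLAIM (what is proved, stated in full; the proofs are below) =====
def Claim_unchanged_pad_up_to : Prop := ∀ (word : String) (shift : Int) (n : Int), Dom_pad_up_to word shift n → Pre_pad_up_to word shift n → Spec_pad_up_to word shift n (pad_up_to word shift n)
def Claim_changed_pad_up_to : Prop := Dom_pad_up_to (pvDiffWitness_pad_up_to.1) (pvDiffWitness_pad_up_to.2.1) (pvDiffWitness_pad_up_to.2.2) ∧ Pre_pad_up_to (pvDiffWitness_pad_up_to.1) (pvDiffWitness_pad_up_to.2.1) (pvDiffWitness_pad_up_to.2.2) ∧ D_pad_up_to (pvDiffWitness_pad_up_to.1) (pvDiffWitness_pad_up_to.2.1) (pvDiffWitness_pad_up_to.2.2) ∧ pad_up_to (pvDiffWitness_pad_up_to.1) (pvDiffWitness_pad_up_to.2.1) (pvDiffWitness_pad_up_to.2.2) = pvDiffWitnessOut_pad_up_to.1 ∧ pad_up_to_alt (pvDiffWitness_pad_up_to.1) (pvDiffWitness_pad_up_to.2.1) (pvDiffWitness_pad_up_to.2.2) = pvDiffWitnessOut_pad_up_to.2 ∧ pvDiffWitnessOut_pad_up_to.1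 ≠ pvDiffWitnessOut_pad_up_to.2
def Claim_exact_pad_up_to : Prop := ∀ (word : String) (shift : Int) (n : Int), Dom_pad_up_to word shift n → Pre_pad_up_to word shift n → D_pad_up_to word shift n → pad_up_to word shift n ≠ pad_up_to_alt word shift n

-- ===== LEMMAS AND PROOFS =====

-- the character B (and, unrolled, A) writes in block b at source char c
def pvF (shift : Int) (b : Nat) (c : Char) : Char :=
  (PySem.List.pyGet? pvAlph
    (PySem.Int.mod (PySem.Chars.find pvAlph [c] + (b : Int) * shift) 26)).getD 'a'

-- flatten of singleton-blocks is map (specific shape simp leaves for shift_characters' foldl)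
theorem pvFlattenSingleton {α β : Type} (l : List α) (f : α → β) :
    (List.map (fun x => [f x]) l).flatten = List.map f l := by
  induction l with
  | nil => simp
  | cons x l ih => simp [ih]

-- For a lowercase letter, alphabet.index and alphabet[·] are inverse.
theorem pvAlph_key (c : Char) (h1 : 97 ≤ c.toNat) (h2 : c.toNat ≤ 122) :
    PySem.Chars.find pvAlph [c] = ((c.toNat : Int) - 97) ∧
      PySem.List.pyGet? pvAlph ((c.toNat : Int) - 97) = some c := by
  obtain ⟨m, hm⟩ : ∃ m, c.toNat = m := ⟨_, rfl⟩
  have hc : c = Char.ofNat c.toNat := (Char.ofNat_toNat c).symm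
  rw [hm] at h1 h2 hc
  subst hc
  interval_cases m <;> refine ⟨by decide, by decide⟩

-- shift_characters, elementwise.
theorem sc_toList (word : String) (s : Int) :
    (shift_characters word s).toList =
      word.toList.map (fun c =>
        (PySem.List.pyGet? pvAlph (PySem.Int.mod (PySem.Chars.find pvAlph [c] + s) 26)).getD 'a') := by
  simp [shift_characters, List.map_map, Function.comp_def]
  exact pvFlattenSingleton _ _

-- A's loop with accumulated new_shift, unrolled to a flatMap with closed-form shifts
-- (stated for an arbitrary block function g to keep the induction syntactic).
theorem padA_loop (g : Int → String) (shift : Int) :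
    ∀ (l : List Int) (acc : String) (s : Int),
      ((l.foldl (fun (st : String × Int) _ =>
          (st.1 ++ g st.2, st.2 + shift)) (acc, s)).1).toList =
        acc.toList ++ (List.range l.length).flatMap
          (fun (i : Nat) => (g (s + (i : Int) * shift)).toList) := by
  intro l
  induction l with
  | nil => intro acc s; simp
  | cons x l ih =>
    intro acc s
    rw [List.foldl_cons, ih (acc ++ g s) (s + shift)]
    rw [List.length_cons, List.range_succ_eq_map, List.flatMap_cons, List.flatMap_map,
      String.toList_append, List.append_assoc]
    congr 2
    · norm_num
    · apply List.flatMap_congr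
      intro i _
      congr 1
      push_cast
      ring_nf

-- Under Pre_, block 0 writes the word itself.
theorem block0_eq (word : String) (shift : Int)
    (hlc : ∀ c ∈ word.toList, 97 ≤ c.toNat ∧ c.toNat ≤ 122) :
    word.toList.map (pvF shift 0) = word.toList := by
  have h : ∀ c ∈ word.toList, pvF shift 0 c = c := by
    intro c hc
    obtain ⟨h1, h2⟩ := hlc c hc
    obtain ⟨hfind, hget⟩ := pvAlph_key c h1 h2
    have hmod : PySem.Int.mod ((c.toNat : Int) - 97) 26 = (c.toNat : Int) - 97 := by
      rw [PySem.Int.mod_eq_emod_of_pos (by norm_num)]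
      exact Int.emod_eq_of_lt (by omega) (by omega)
    simp only [pvF, hfind, Nat.cast_zero, zero_mul, add_zero, hmod, hget]
    rfl
  rw [List.map_congr_left h]
  simp

-- any map over a list is a map over its index range
theorem pvMapEqRange {α β : Type} (l : List α) (g : α → β) (d : α) :
    l.map g = (List.range l.length).map (fun i => g (l.getD i d)) := by
  apply List.ext_getElem (by simp)
  intro i h1 h2
  have hi : i < l.length := by simpa using h1
  simp [List.getD_eq_getElem?_getD, List.getElem?_eq_getElem hi]

-- B blocks of length L laid out flat are a single map over positions, via divmod
theorem pvFlatBlocks {α β : Type} (l : List α) (d : α) (F : Nat → α → β)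
    (hL : 0 < l.length) :
    ∀ B : Nat, (List.range B).flatMap (fun b => l.map (F b)) =
      (List.range (B * l.length)).map
        (fun p => F (p / l.length) (l.getD (p % l.length) d)) := by
  intro B
  induction B with
  | zero => simp
  | succ B ih =>
    rw [List.range_succ, List.flatMap_append, ih, Nat.succ_mul, List.range_add,
      List.map_append]
    congr 1
    rw [List.flatMap_cons, List.flatMap_nil, List.append_nil, List.map_map,
      pvMapEqRange l (F B) d]
    apply List.map_congr_left
    intro k hk
    have hkL : k < l.length := List.mem_range.mp hk
    simp only [Function.comp_def]
    rw [Nat.add_comm (B * l.length) k, Nat.add_mul_div_right k B hL,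
      Nat.add_mul_mod_self_right, Nat.div_eq_of_lt hkL, Nat.mod_eq_of_lt hkL,
      Nat.zero_add]

-- B's output, elementwise over Nat positions
theorem pvB_toList (word : String) (shift : Int) (n : Int)
    (hne : word.toList ≠ []) :
    (pad_up_to_alt word shift n).toList =
      (List.range n.toNat).map (fun k =>
        pvF shift (k / word.toList.length)
          (word.toList.getD (k % word.toList.length) ' ')) := by
  have hL : 0 < word.toList.length := List.length_pos_of_ne_nil hne
  simp only [pad_up_to_alt, String.toList_ofList, PySem.List.pyRange_one]
  rw [show (n - 0).toNat = n.toNat by omega, List.map_map]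
  apply List.map_congr_left
  intro k _
  have hL' : 0 < word.length := by rw [← String.length_toList]; exact hL
  have hidx : k % word.length < word.toList.length := by
    rw [String.length_toList]; exact Nat.mod_lt k hL'
  simp only [Function.comp_def, zero_add, pvF, PySem.Str.len_eq, String.length_toList]
  rw [PySem.Int.mod_natCast, PySem.Int.floordiv_natCast, PySem.Str.pyGet?_natCast,
    List.getElem?_eq_getElem hidx, List.getD_eq_getElem?_getD,
    List.getElem?_eq_getElem hidx]

-- the ceiling bracket for A's `times`
theorem pvTimes_bounds (word : String) (n : Int) (hne : word.toList ≠ []) :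
    ((-(PySem.Int.floordiv (-n) (PySem.Str.len word))) - 1) * (word.toList.length : Int) < n ∧
      n ≤ (-(PySem.Int.floordiv (-n) (PySem.Str.len word))) * (word.toList.length : Int) := by
  have hL : 0 < word.toList.length := List.length_pos_of_ne_nil hne
  have hLi : 0 < ((word.toList.length : Int)) := by exact_mod_cast hL
  have := (PySem.Int.neg_floordiv_neg_eq_iff_of_pos (a := n)
    (b := (word.toList.length : Int)) (q := -(PySem.Int.floordiv (-n) ((word.toList.length : Int)))) hLi).mp
  rw [PySem.Str.len_eq]
  exact this rfl

-- ===== VERDICT (by name: the statement is the Claim_ definition above) =====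
theorem pad_up_to_spec : Claim_unchanged_pad_up_to := by
  intro word shift n _ hpre hnd
  obtain ⟨hne, hlow⟩ := hpre
  have hL : 0 < word.toList.length := List.length_pos_of_ne_nil hne
  show pad_up_to word shift n = pad_up_to_alt word shift n
  apply String.toList_inj.mp
  by_cases hn : n ≤ 0
  · -- n ≤ 0 and ¬D_: A is word[:n] = '' , B is ''
    have hout : (word.toList.length : Int) + n ≤ 0 ∨ n = 0 := by
      by_cases h0 : n = 0
      · right; exact h0
      · left
        by_contra hc
        exact hnd ⟨by omega, by omega⟩
    have htimes : -(PySem.Int.floordiv (-n) (PySem.Str.len word)) ≤ 0 := by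
      have hLi : 0 < ((word.toList.length : Int)) := by exact_mod_cast hL
      have : 0 ≤ PySem.Int.floordiv (-n) ((word.toList.length : Int)) := by
        rw [PySem.Int.floordiv_eq_ediv_of_pos hLi]
        exact Int.ediv_nonneg (by omega) (by omega)
      rw [PySem.Str.len_eq]
      omega
    simp only [pad_up_to]
    rw [PySem.List.pyRange_one_eq_nil htimes, List.foldl_nil]
    rw [pvB_toList word shift n hne, show n.toNat = 0 by omega]
    simp only [List.range_zero, List.map_nil]
    rcases hout with h | h
    · have hk : 0 < (-n).toNat := by omega
      have hn' : n = -(((-n).toNat : Nat) : Int) := by omega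
      rw [hn']
      simp only [PySem.Str.toList_slice, PySem.Chars.slice_eq_listSlice]
      rw [PySem.List.slice_to_neg_natCast _ _ hk]
      rw [show word.toList.length - (-n).toNat = 0 by omega, List.take_zero]
    · rw [h]
      simp only [PySem.Str.toList_slice, PySem.Chars.slice_eq_listSlice]
      rw [PySem.List.slice_to _ (le_refl (0 : Int))]
      simp
  · -- n > 0: both are the first n characters of the block stream
    push_neg at hn
    have hlcb := hlow.resolve_left (by omega)
    have hlc : ∀ c ∈ word.toList, 97 ≤ c.toNat ∧ c.toNat ≤ 122 := by
      intro c hc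
      have := List.all_eq_true.mp hlcb c hc
      simpa using this
    obtain ⟨hlo, hhi⟩ := pvTimes_bounds word n hne
    set times := -(PySem.Int.floordiv (-n) (PySem.Str.len word)) with htimes
    have hLi : 0 < ((word.toList.length : Int)) := by exact_mod_cast hL
    have htpos : 0 < times := by nlinarith
    simp only [pad_up_to, PySem.Str.toList_slice, PySem.Chars.slice_eq_listSlice]
    rw [pvB_toList word shift n hne]
    rw [padA_loop (shift_characters word) shift]
    have hlen : (PySem.List.pyRange 0 times 1).length = times.toNat := by
      rw [PySem.List.length_pyRange_one]; norm_num
    rw [hlen]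
    -- pre-slice stream = flat blocks 0..times
    have hstream : word.toList ++ (List.range times.toNat).flatMap
        (fun (i : Nat) => (shift_characters word (shift + (i : Int) * shift)).toList) =
        (List.range (times.toNat + 1)).flatMap (fun b => word.toList.map (pvF shift b)) := by
      rw [List.range_succ_eq_map, List.flatMap_cons, List.flatMap_map]
      congr 1
      · exact (block0_eq word shift hlc).symm
      · apply List.flatMap_congr
        intro i _
        rw [sc_toList]
        apply List.map_congr_left
        intro c _
        simp only [pvF]
        congr 2
        push_cast
        ring_nf
    rw [hstream, pvFlatBlocks word.toList ' ' (pvF shift) hL (times.toNat + 1)]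
    rw [PySem.List.slice_to _ (by omega), ← List.map_take, List.take_range]
    congr 2
    have : n.toNat ≤ times.toNat * word.toList.length := by
      have : n ≤ times * (word.toList.length : Int) := hhi
      have ht0 : times.toNat = times := Int.toNat_of_nonneg htpos.le
      zify
      rw [Int.toNat_of_nonneg (by omega), ht0]
      exact hhi
    have hg : (times.toNat + 1) * word.toList.length
        = times.toNat * word.toList.length + word.toList.length := by ring
    omega

theorem pad_up_to_changed : Claim_changed_pad_up_to := by
  unfold Claim_changed_pad_up_to; decide

theorem pad_up_to_tight : Claim_exact_pad_up_to := by
  intro word shift n _ hpre hd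
  obtain ⟨hne, _⟩ := hpre
  obtain ⟨hn, hLn⟩ := hd
  have hL : 0 < word.toList.length := List.length_pos_of_ne_nil hne
  intro heq
  have heq' := congrArg String.toList heq
  have htimes : -(PySem.Int.floordiv (-n) (PySem.Str.len word)) ≤ 0 := by
    have hLi : 0 < ((word.toList.length : Int)) := by exact_mod_cast hL
    have : 0 ≤ PySem.Int.floordiv (-n) ((word.toList.length : Int)) := by
      rw [PySem.Int.floordiv_eq_ediv_of_pos hLi]
      exact Int.ediv_nonneg (by omega) (by omega)
    rw [PySem.Str.len_eq]
    omega
  rw [pvB_toList word shift n hne, show n.toNat = 0 by omega] at heq'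
  simp only [List.range_zero, List.map_nil] at heq'
  simp only [pad_up_to] at heq'
  rw [PySem.List.pyRange_one_eq_nil htimes, List.foldl_nil] at heq'
  have hk : 0 < (-n).toNat := by omega
  have hn' : n = -(((-n).toNat : Nat) : Int) := by omega
  rw [hn'] at heq'
  simp only [PySem.Str.toList_slice, PySem.Chars.slice_eq_listSlice] at heq'
  rw [PySem.List.slice_to_neg_natCast _ _ hk] at heq'
  have : word.toList.length - (-n).toNat ≠ 0 := by omega
  have hlen := congrArg List.length heq'
  simp [List.length_take] at hlen
  have hbl : word.toList.length = word.length := String.length_toList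
  omega
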